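-- pv_equiv track=rewrite | github.com/waldis-jr-dev/JuniorIT | _2019_2020/Exams/Test_2/_5.py | f
-- ===== SOURCE A (Python) =====
-- def f(st):
--     new = ''
--     new2 = ''
--     for i in st:
--         if i in 'AEIOUaeiou':
--             new += i
--         else:
--             new2 += i
--     st = new2 + new
--     return st
-- ===== SOURCE B (Python) =====
-- def f(st):
--     return ''.join(sorted(st, key=lambda c: c in 'AEIOUaeiou'))
-- ===== Notes on version B (the rewrite author's own statement) =====
-- stated objective: idiomatic
-- what changed: Replaces the two-accumulator partition loop with a single stable sort keyed on vowelhood (False sorts before True), so consonants keep their order in front and vowels follow in order.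
import Mathlib
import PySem

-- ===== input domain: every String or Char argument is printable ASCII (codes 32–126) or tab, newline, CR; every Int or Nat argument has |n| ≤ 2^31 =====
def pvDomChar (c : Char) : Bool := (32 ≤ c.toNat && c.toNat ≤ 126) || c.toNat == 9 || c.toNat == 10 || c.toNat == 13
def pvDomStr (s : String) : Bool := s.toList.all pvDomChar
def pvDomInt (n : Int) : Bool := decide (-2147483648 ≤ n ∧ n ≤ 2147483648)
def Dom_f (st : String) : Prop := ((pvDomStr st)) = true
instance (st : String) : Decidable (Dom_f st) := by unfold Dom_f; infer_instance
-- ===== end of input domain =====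

-- B replaces A's two-accumulator partition loop with one stable sort keyed on vowelhood (idiomatic rewrite, same result).


-- ===== PORT A =====
def pvVowels : List Char := "AEIOUaeiou".toList

-- the for-loop of A: accumulators new (vowels) and new2 (consonants), final 'new2 + new'
def fGo : List Char → List Char → List Char → String
  | [], new, new2 => String.ofList (new2 ++ new)
  | i :: rest, new, new2 =>
      if pvVowels.contains i then fGo rest (new ++ [i]) new2
      else fGo rest new (new2 ++ [i])

def f (st : String) : String := fGo st.toList [] []

-- ===== PORT B =====
-- key=lambda c: c in 'AEIOUaeiou'  (Python bools sort as 0/1: False < True)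
def fKey (c : Char) : Int := if pvVowels.contains c then 1 else 0

def f_alt (st : String) : String :=
  String.ofList (PySem.List.sorted st.toList fKey false)

-- ===== PRECONDITION & SPEC =====
def Spec_f (st : String) (out : String) : Prop := out = f_alt st
instance (st : String) (out : String) : Decidable (Spec_f st out) := by unfold Spec_f; infer_instance

-- ===== CLAIM (what is proved, stated in full; the proofs are below) =====
def Claim_equal_f : Prop := ∀ (st : String), Dom_f st → Spec_f st (f st)

-- ===== LEMMAS AND PROOFS =====

theorem fGo_spec (cs new new2 : List Char) :
    fGo cs new new2 =
      String.ofList ((new2 ++ cs.filter (fun c => !pvVowels.contains c)) ++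
                 (new ++ cs.filter (fun c => pvVowels.contains c))) := by
  induction cs generalizing new new2 with
  | nil => simp [fGo]
  | cons c rest ih =>
    by_cases h : c ∈ pvVowels
    · simp [fGo, h, ih]
    · simp [fGo, h, ih]

theorem insertBy_key_zero (x : Char) (hx : fKey x = 0)
    (N V : List Char) (hN : ∀ n ∈ N, fKey n = 0) (hV : ∀ v ∈ V, fKey v = 1) :
    PySem.List.insertBy (fun a b => decide (fKey a < fKey b)) x (N ++ V) = (N ++ [x]) ++ V := by
  induction N with
  | nil =>
    cases V with
    | nil => simp [PySem.List.insertBy]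
    | cons v vs =>
      have hv : fKey v = 1 := hV v (by simp)
      simp [PySem.List.insertBy, hx, hv]
  | cons n ns ih =>
    have hn : fKey n = 0 := hN n (by simp)
    have := ih (fun m hm => hN m (by simp [hm]))
    simp [PySem.List.insertBy, hx, hn] at this ⊢
    exact this

theorem insertBy_key_one (x : Char) (hx : fKey x = 1)
    (L : List Char) (hL : ∀ y ∈ L, fKey y ≤ 1) :
    PySem.List.insertBy (fun a b => decide (fKey a < fKey b)) x L = L ++ [x] := by
  apply PySem.List.insertBy_of_forall_not_before
  intro y hy
  simp only [decide_eq_false_iff_not, not_lt, hx]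
  exact hL y hy

theorem foldl_insert_partition (cs N V : List Char)
    (hN : ∀ n ∈ N, fKey n = 0) (hV : ∀ v ∈ V, fKey v = 1) :
    cs.foldl (fun acc x => PySem.List.insertBy (fun a b => decide (fKey a < fKey b)) x acc) (N ++ V)
      = (N ++ cs.filter (fun c => !pvVowels.contains c)) ++
        (V ++ cs.filter (fun c => pvVowels.contains c)) := by
  induction cs generalizing N V with
  | nil => simp
  | cons c rest ih =>
    by_cases h : c ∈ pvVowels
    · have hk : fKey c = 1 := by simp [fKey, h]
      have hstep : PySem.List.insertBy (fun a b => decide (fKey a < fKey b)) c (N ++ V)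
          = N ++ (V ++ [c]) := by
        rw [insertBy_key_one c hk]
        · simp
        · intro y hy
          rcases List.mem_append.mp hy with h1 | h1
          · simp [hN y h1]
          · simp [hV y h1]
      have := ih N (V ++ [c]) hN (by
        intro v hv
        rcases List.mem_append.mp hv with h1 | h1
        · exact hV v h1
        · simp at h1; simp [h1, hk])
      simp only [List.foldl_cons, hstep, this, List.filter_cons]
      simp [h]
    · have hk : fKey c = 0 := by simp [fKey, h]
      have hstep : PySem.List.insertBy (fun a b => decide (fKey a < fKey b)) c (N ++ V)
          = (N ++ [c]) ++ V := insertBy_key_zero c hk N V hN hV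
      have := ih (N ++ [c]) V (by
        intro n hn
        rcases List.mem_append.mp hn with h1 | h1
        · exact hN n h1
        · simp at h1; simp [h1, hk]) hV
      simp only [List.foldl_cons, hstep, this, List.filter_cons]
      simp [h]

theorem sorted_eq_partition (cs : List Char) :
    PySem.List.sorted cs fKey false
      = cs.filter (fun c => !pvVowels.contains c) ++ cs.filter (fun c => pvVowels.contains c) := by
  rw [PySem.List.sorted_eq_foldl_insertBy]
  have := foldl_insert_partition cs [] [] (by simp) (by simp)
  simpa using this

-- ===== VERDICT (by name: the statement is the Claim_ definition above) =====
theorem f_spec : Claim_equal_f := by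
  intro st _
  unfold Spec_f f f_alt
  rw [fGo_spec, sorted_eq_partition]
  simp
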